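-- pv_equiv track=rewrite | github.com/collinsakenga/codewars_solutions | 6 kyu/Moves in squared strings IV.py | selfie_diag2_counterclock
-- ===== SOURCE A (Python) =====
-- def diag_2_sym(s):
--     temp=s.split("\n")
--     res=[[None]*len(temp[i]) for i in range(len(temp))]
--     for i in range(len(temp)):
--         for j in range(len(temp[i])):
--             res[i][j]=temp[len(temp[i])-1-j][len(temp)-1-i]
--     return "\n".join(("".join(i) for i in res))
--
-- def rot_90_counter(s):
--     temp=s.split("\n")
--     res=[[None]*len(temp[i]) for i in range(len(temp))]
--     for i in range(len(temp)):
--         for j in range(len(temp[i])):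
--             res[i][j]=temp[j][len(temp)-1-i]
--     return "\n".join(("".join(i) for i in res))
--
-- def selfie_diag2_counterclock(s):
--     temp=s.split("\n")
--     temp2=diag_2_sym(s).split("\n")
--     temp3=rot_90_counter(s).split("\n")
--     res=[]
--     for i in range(len(temp)):
--         res.append(f"{temp[i]}|{temp2[i]}|{temp3[i]}")
--     return "\n".join(("".join(i) for i in res))
-- ===== SOURCE B (Python) =====
-- def selfie_diag2_counterclock(s):
--     rows = s.split("\n")
--     n = len(rows)
--     out = []
--     for i in range(n):
--         # column n-1-i read top-down is the rotation's row i;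
--         # its reverse is the anti-diagonal-symmetry's row i.
--         col = "".join(rows[j][n - 1 - i] for j in range(len(rows[i])))
--         out.append(f"{rows[i]}|{col[::-1]}|{col}")
--     return "\n".join(out)
-- ===== Notes on version B (the rewrite author's own statement) =====
-- stated objective: alternative
-- what changed: Instead of materialising two whole transformed grids with nested index loops in two helper functions, joining them and re-splitting them, B builds each output line in a single loop from one column read of the grid, using that the anti-diagonal-symmetry row is the reverse of the rotation row.
import Mathlib
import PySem

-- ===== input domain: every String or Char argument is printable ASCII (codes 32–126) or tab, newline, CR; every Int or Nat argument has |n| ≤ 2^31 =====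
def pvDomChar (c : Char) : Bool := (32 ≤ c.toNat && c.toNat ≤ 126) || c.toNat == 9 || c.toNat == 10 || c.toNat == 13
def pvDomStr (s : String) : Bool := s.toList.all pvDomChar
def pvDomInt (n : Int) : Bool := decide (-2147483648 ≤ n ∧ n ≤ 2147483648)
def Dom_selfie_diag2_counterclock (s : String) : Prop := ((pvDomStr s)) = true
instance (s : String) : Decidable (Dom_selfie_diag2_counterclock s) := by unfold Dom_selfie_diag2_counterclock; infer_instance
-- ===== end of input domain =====

-- B computes each output line in one pass from a single column read of the grid
-- (the rotation row and its reverse, the anti-diagonal row), instead of building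
-- two whole transformed grids with nested index loops and re-splitting them.


-- ===== PORT A =====
-- temp[a][b] with Int indices; `none` (Python IndexError) is excluded by Pre_, so the
-- `.getD ' '` default is never reached on admitted inputs.
def pvCellA (temp : List (List Char)) (a b : Int) : Char :=
  ((PySem.List.pyGet? temp a).bind fun r => PySem.List.pyGet? r b).getD ' '

-- res is preallocated and every cell (i,j) assigned exactly once: ported as the map
-- filling cell (i,j); the inner "".join over a row of single chars is that row itself.
def diag_2_sym (s : String) : String :=
  let temp := PySem.Chars.splitOn s.toList ['\n']
  let res := (List.range temp.length).map (fun (i : Nat) =>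
    let mi := (temp.getD i []).length
    (List.range mi).map (fun (j : Nat) =>
      pvCellA temp ((mi : Int) - 1 - (j : Int)) ((temp.length : Int) - 1 - (i : Int))))
  String.ofList (PySem.Chars.join ['\n'] res)

def rot_90_counter (s : String) : String :=
  let temp := PySem.Chars.splitOn s.toList ['\n']
  let res := (List.range temp.length).map (fun (i : Nat) =>
    let mi := (temp.getD i []).length
    (List.range mi).map (fun (j : Nat) =>
      pvCellA temp (j : Int) ((temp.length : Int) - 1 - (i : Int))))
  String.ofList (PySem.Chars.join ['\n'] res)

-- temp2[i]/temp3[i]: in range on Pre_ (all three lists have temp.length rows there).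
def selfie_diag2_counterclock (s : String) : String :=
  let temp := PySem.Chars.splitOn s.toList ['\n']
  let temp2 := PySem.Chars.splitOn (diag_2_sym s).toList ['\n']
  let temp3 := PySem.Chars.splitOn (rot_90_counter s).toList ['\n']
  let res := (List.range temp.length).foldl (fun acc i =>
    acc ++ [temp.getD i [] ++ ['|'] ++ temp2.getD i [] ++ ['|'] ++ temp3.getD i []]) []
  String.ofList (PySem.Chars.join ['\n'] res)

-- ===== PORT B =====
-- rows[j][n-1-i]: none (IndexError) excluded by Pre_, so the .getD ' ' default is
-- never reached on admitted inputs; col[::-1] is List.reverse.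
def selfie_diag2_counterclock_alt (s : String) : String :=
  let rows := PySem.Chars.splitOn s.toList ['\n']
  let n := rows.length
  let out := (List.range n).foldl (fun acc (i : Nat) =>
    let col := (List.range (rows.getD i []).length).map (fun (j : Nat) =>
      ((PySem.List.pyGet? rows (j : Int)).bind (fun row =>
        PySem.List.pyGet? row ((n : Int) - 1 - (i : Int)))).getD ' ')
    acc ++ [rows.getD i [] ++ ['|'] ++ col.reverse ++ ['|'] ++ col]) []
  String.ofList (PySem.Chars.join ['\n'] out)

-- ===== PRECONDITION & SPEC =====
-- Pre_ admits the square grids (each line as long as the number of lines) and the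
-- degenerate grids whose lines are all empty; on every other input A's mixed
-- len(temp)/len(temp[i]) indexing raises IndexError.
def Pre_selfie_diag2_counterclock (s : String) : Prop :=
  (∀ r ∈ PySem.Chars.splitOn s.toList ['\n'],
    r.length = (PySem.Chars.splitOn s.toList ['\n']).length) ∨
  (∀ r ∈ PySem.Chars.splitOn s.toList ['\n'], r.length = 0)

instance (s : String) : Decidable (Pre_selfie_diag2_counterclock s) := by
  unfold Pre_selfie_diag2_counterclock; infer_instance

def pvWitness_selfie_diag2_counterclock : String := "ab\ncd"

def Spec_selfie_diag2_counterclock (s : String) (out : String) : Prop := out = selfie_diag2_counterclock_alt s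
instance (s : String) (out : String) : Decidable (Spec_selfie_diag2_counterclock s out) := by unfold Spec_selfie_diag2_counterclock; infer_instance

-- ===== CLAIM (what is proved, stated in full; the proofs are below) =====
def Claim_equal_selfie_diag2_counterclock : Prop := ∀ (s : String), Dom_selfie_diag2_counterclock s → Pre_selfie_diag2_counterclock s → Spec_selfie_diag2_counterclock s (selfie_diag2_counterclock s)

-- ===== LEMMAS AND PROOFS =====

-- a successful pyGet? returns an element of the list
theorem pvGet_mem {α : Type} {xs : List α} {i : Int} {x : α}
    (h : PySem.List.pyGet? xs i = some x) : x ∈ xs := by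
  unfold PySem.List.pyGet? at h
  obtain ⟨k, -, hk⟩ := Option.bind_eq_some_iff.mp h
  exact List.mem_of_getElem? hk

-- a grid cell is never a character absent from every row (and ≠ the default ' ')
theorem pvCellA_ne (temp : List (List Char)) (a b : Int) (c : Char) (hc : c ≠ ' ')
    (hfree : ∀ r ∈ temp, c ∉ r) : pvCellA temp a b ≠ c := by
  unfold pvCellA
  cases h1 : PySem.List.pyGet? temp a with
  | none => simp only [Option.bind_none, Option.getD_none]; exact fun h => hc h.symm
  | some r =>
    simp only [Option.bind_some]
    cases h2 : PySem.List.pyGet? r b with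
    | none => simp only [Option.getD_none]; exact fun h => hc h.symm
    | some ch =>
      simp only [Option.getD_some]
      intro h
      exact hfree r (pvGet_mem h1) (h ▸ pvGet_mem h2)

-- splitOn.go: scanning a chunk free of the separator
theorem pvGo_scan (c : Char) (p : List Char) (hp : c ∉ p) :
    ∀ (fuel : Nat) (l cur : List Char) (acc : List (List Char)),
    PySem.Chars.splitOn.go [c] (p.length + fuel + 1) (p ++ l) cur acc =
      PySem.Chars.splitOn.go [c] (fuel + 1) l (p.reverse ++ cur) acc := by
  induction p with
  | nil => intro fuel l cur acc; simp
  | cons a p ih =>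
    intro fuel l cur acc
    have hac : c ≠ a := fun h => hp (h ▸ List.mem_cons_self)
    have hp' : c ∉ p := fun h => hp (List.mem_cons_of_mem _ h)
    rw [show (a :: p).length + fuel + 1 = p.length + fuel + 1 + 1 by simp; omega]
    simp only [List.cons_append]
    rw [show PySem.Chars.splitOn.go [c] (p.length + fuel + 1 + 1) (a :: (p ++ l)) cur acc =
        PySem.Chars.splitOn.go [c] (p.length + fuel + 1) (p ++ l) (a :: cur) acc from by
      simp [PySem.Chars.splitOn.go, List.isPrefixOf, hac]]
    rw [ih hp' fuel l (a :: cur) acc]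
    simp

-- splitOn.go: empty input
theorem pvGo_nil (c : Char) (fuel : Nat) (cur : List Char) (acc : List (List Char)) :
    PySem.Chars.splitOn.go [c] fuel [] cur acc = (cur.reverse :: acc).reverse := by
  cases fuel <;> simp [PySem.Chars.splitOn.go]

-- splitOn.go: consuming the separator
theorem pvGo_sep (c : Char) (fuel : Nat) (l cur : List Char) (acc : List (List Char)) :
    PySem.Chars.splitOn.go [c] (fuel + 1) (c :: l) cur acc =
      PySem.Chars.splitOn.go [c] fuel l [] (cur.reverse :: acc) := by
  simp [PySem.Chars.splitOn.go, List.isPrefixOf]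

theorem pvGo_join (c : Char) : ∀ (ps : List (List Char)), ps ≠ [] →
    (∀ p ∈ ps, c ∉ p) → ∀ acc,
    PySem.Chars.splitOn.go [c] ((PySem.Chars.join [c] ps).length + 1)
      (PySem.Chars.join [c] ps) [] acc = acc.reverse ++ ps := by
  intro ps
  induction ps with
  | nil => intro h; exact absurd rfl h
  | cons p qs ih =>
    intro _ hfree acc
    cases qs with
    | nil =>
      rw [PySem.Chars.join_singleton]
      have := pvGo_scan c p (hfree p List.mem_cons_self) 0 [] [] acc
      simp only [List.append_nil] at this
      rw [this, pvGo_nil]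
      simp
    | cons q rest =>
      rw [PySem.Chars.join_cons_cons]
      set J := PySem.Chars.join [c] (q :: rest) with hJ
      have hlen : (p ++ [c] ++ J).length = p.length + (J.length + 1) + 1 - 1 := by
        simp
      rw [hlen]
      have harr : p ++ [c] ++ J = p ++ (c :: J) := by simp
      rw [harr]
      have h1 := pvGo_scan c p (hfree p List.mem_cons_self) (J.length + 1) (c :: J) [] acc
      rw [show p.length + (J.length + 1) + 1 - 1 + 1 = p.length + (J.length + 1) + 1 by omega, h1,
        pvGo_sep]
      have h2 := ih (by simp) (fun r hr => hfree r (List.mem_cons_of_mem _ hr))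
        ((p.reverse ++ []).reverse :: acc)
      rw [h2]
      simp

-- splitting the join of separator-free parts gives the parts back
theorem pvSplit_join (c : Char) (ps : List (List Char)) (hne : ps ≠ [])
    (hfree : ∀ p ∈ ps, c ∉ p) :
    PySem.Chars.splitOn (PySem.Chars.join [c] ps) [c] = ps := by
  rw [PySem.Chars.splitOn, pvGo_join c ps hne hfree []]
  simp

theorem pvGo_free (c : Char) : ∀ (fuel : Nat) (l cur : List Char) (acc : List (List Char)),
    l.length < fuel → c ∉ cur → (∀ p ∈ acc, c ∉ p) →
    ∀ p ∈ PySem.Chars.splitOn.go [c] fuel l cur acc, c ∉ p := by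
  intro fuel
  induction fuel with
  | zero => intro l cur acc h; omega
  | succ f ih =>
    intro l cur acc hlen hcur hacc
    cases l with
    | nil =>
      rw [pvGo_nil]
      intro p hp
      simp only [List.mem_reverse, List.mem_cons] at hp
      rcases hp with h | h
      · subst h; simpa using hcur
      · exact hacc p h
    | cons d rest =>
      by_cases hd : c = d
      · subst hd
        rw [pvGo_sep]
        exact ih rest [] _ (by simp at hlen ⊢; omega) (by simp)
          (fun p hp => by
            rcases List.mem_cons.mp hp with h | h
            · subst h; simpa using hcur
            · exact hacc p h)
      · rw [show PySem.Chars.splitOn.go [c] (f + 1) (d :: rest) cur acc =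
            PySem.Chars.splitOn.go [c] f rest (d :: cur) acc from by
          simp [PySem.Chars.splitOn.go, List.isPrefixOf, hd]]
        exact ih rest (d :: cur) acc (by simp at hlen ⊢; omega)
          (by simp [hcur, hd]) hacc

-- parts of a single-char split never contain the separator
theorem pvSplit_free (c : Char) (s : List Char) :
    ∀ p ∈ PySem.Chars.splitOn s [c], c ∉ p := by
  rw [PySem.Chars.splitOn]
  exact pvGo_free c (s.length + 1) s [] [] (by omega) (by simp) (by simp)

theorem pvGo_ne_nil (c : Char) : ∀ (fuel : Nat) (l cur : List Char) (acc : List (List Char)),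
    PySem.Chars.splitOn.go [c] fuel l cur acc ≠ [] := by
  intro fuel
  induction fuel with
  | zero => intro l cur acc; simp [PySem.Chars.splitOn.go]
  | succ f ih =>
    intro l cur acc
    cases l with
    | nil => rw [pvGo_nil]; simp
    | cons d rest =>
      by_cases hd : c = d
      · subst hd; rw [pvGo_sep]; exact ih rest [] _
      · rw [show PySem.Chars.splitOn.go [c] (f + 1) (d :: rest) cur acc =
            PySem.Chars.splitOn.go [c] f rest (d :: cur) acc from by
          simp [PySem.Chars.splitOn.go, List.isPrefixOf, hd]]
        exact ih rest (d :: cur) acc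

-- a split is never empty
theorem pvSplit_ne_nil (c : Char) (s : List Char) :
    PySem.Chars.splitOn s [c] ≠ [] := by
  rw [PySem.Chars.splitOn]; exact pvGo_ne_nil c (s.length + 1) s [] []

-- reading range n backwards through g is the reverse of reading it forwards
theorem pvMap_range_rev {α : Type} (n : Nat) (g : Nat → α) :
    (List.range n).map (fun j => g (n - 1 - j)) = ((List.range n).map g).reverse := by
  induction n with
  | zero => simp
  | succ n ih =>
    conv_rhs => rw [List.range_succ]
    conv_lhs => rw [List.range_succ_eq_map]
    simp only [List.map_cons, List.map_map, List.map_append, List.reverse_append,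
      List.reverse_cons]
    have h2 : ∀ j : Nat, n + 1 - 1 - (j + 1) = n - 1 - j := by omega
    simp only [Function.comp_def, Nat.succ_eq_add_one, List.map_nil,
      Nat.add_sub_cancel, Nat.sub_zero]
    have h3 : ∀ j : Nat, n - (j + 1) = n - 1 - j := by omega
    rw [List.map_congr_left (fun x _ => by rw [h3 x]), ih]
    simp

-- a row read back-to-front is the reverse of the row read front-to-back
theorem pvRow_rev (temp : List (List Char)) (W : Nat) (b : Int) :
    (List.range W).map (fun (j : Nat) => pvCellA temp ((W : Int) - 1 - (j : Int)) b) =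
      ((List.range W).map (fun (j : Nat) => pvCellA temp (j : Int) b)).reverse := by
  rw [List.map_congr_left (l := List.range W)
    (g := fun j => pvCellA temp ((W - 1 - j : Nat) : Int) b)
    (fun j hj => by
      have hjn : j < W := List.mem_range.mp hj
      rw [show ((W : Int) - 1 - (j : Int)) = ((W - 1 - j : Nat) : Int) by omega])]
  exact pvMap_range_rev W (fun k => pvCellA temp (k : Int) b)

-- ===== VERDICT (by name: the statement is the Claim_ definition above) =====
theorem selfie_diag2_counterclock_spec : Claim_equal_selfie_diag2_counterclock := by
  intro s _ hpre
  unfold Spec_selfie_diag2_counterclock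
  unfold Pre_selfie_diag2_counterclock at hpre
  unfold selfie_diag2_counterclock selfie_diag2_counterclock_alt diag_2_sym rot_90_counter
  set temp := PySem.Chars.splitOn s.toList ['\n'] with htemp
  have hne : temp ≠ [] := pvSplit_ne_nil '\n' s.toList
  have hn : 0 < temp.length := List.length_pos_iff.mpr hne
  have hfree : ∀ r ∈ temp, '\n' ∉ r := pvSplit_free '\n' s.toList
  -- the common row width W: the side length on square grids, 0 on all-empty grids
  obtain ⟨W, hmi⟩ : ∃ W : Nat, ∀ i ∈ List.range temp.length, (temp.getD i []).length = W := by
    rcases hpre with h | h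
    · exact ⟨temp.length, fun i hi => by
        have hilt : i < temp.length := List.mem_range.mp hi
        rw [List.getD_eq_getElem temp [] hilt]
        exact h _ (List.getElem_mem hilt)⟩
    · exact ⟨0, fun i hi => by
        have hilt : i < temp.length := List.mem_range.mp hi
        rw [List.getD_eq_getElem temp [] hilt]
        exact h _ (List.getElem_mem hilt)⟩
  -- the two transformed grids, with each inner row length rewritten to W
  have hrows2 : (List.range temp.length).map (fun (i : Nat) =>
      (List.range (temp.getD i []).length).map (fun (j : Nat) =>
        pvCellA temp (((temp.getD i []).length : Int) - 1 - (j : Int))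
          ((temp.length : Int) - 1 - (i : Int)))) =
      (List.range temp.length).map (fun (i : Nat) =>
        (List.range W).map (fun (j : Nat) =>
          pvCellA temp ((W : Int) - 1 - (j : Int))
            ((temp.length : Int) - 1 - (i : Int)))) := by
    apply List.map_congr_left; intro i hi; rw [hmi i hi]
  have hrows3 : (List.range temp.length).map (fun (i : Nat) =>
      (List.range (temp.getD i []).length).map (fun (j : Nat) =>
        pvCellA temp (j : Int) ((temp.length : Int) - 1 - (i : Int)))) =
      (List.range temp.length).map (fun (i : Nat) =>
        (List.range W).map (fun (j : Nat) =>
          pvCellA temp (j : Int) ((temp.length : Int) - 1 - (i : Int)))) := by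
    apply List.map_congr_left; intro i hi; rw [hmi i hi]
  -- every row of a transformed grid is separator-free
  have hfree2 : ∀ (rows : List (List Char)) (g : Nat → Nat → Char),
      rows = (List.range temp.length).map (fun (i : Nat) =>
        (List.range W).map (fun (j : Nat) => g i j)) →
      (∀ i j, ∃ a b, g i j = pvCellA temp a b) → ∀ p ∈ rows, '\n' ∉ p := by
    intro rows g hrows hcell p hp hmem
    subst hrows
    obtain ⟨i, -, hi⟩ := List.mem_map.mp hp
    subst hi
    obtain ⟨j, -, hj⟩ := List.mem_map.mp hmem
    obtain ⟨a, b, hab⟩ := hcell i j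
    exact pvCellA_ne temp a b '\n' (by decide) hfree (by rw [← hab]; exact hj)
  simp only [String.toList_ofList]
  rw [hrows2, hrows3]
  rw [pvSplit_join '\n' _ (by simp [hn.ne']) (hfree2 _ _ rfl fun i j => ⟨_, _, rfl⟩)]
  rw [pvSplit_join '\n' _ (by simp [hn.ne']) (hfree2 _ _ rfl fun i j => ⟨_, _, rfl⟩)]
  rw [PySem.List.foldl_append_singleton_eq_map, PySem.List.foldl_append_singleton_eq_map]
  apply congrArg
  apply congrArg
  simp only [List.nil_append]
  apply List.map_congr_left
  intro i hi
  have hilt : i < temp.length := List.mem_range.mp hi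
  rw [PySem.List.getD_map_range _ temp.length i [] hilt,
      PySem.List.getD_map_range _ temp.length i [] hilt]
  -- B's column, written through pvCellA, over the common width W
  rw [hmi i hi]
  rw [show (fun (j : Nat) => ((PySem.List.pyGet? temp (j : Int)).bind (fun row =>
      PySem.List.pyGet? row ((temp.length : Int) - 1 - (i : Int)))).getD ' ') =
    (fun (j : Nat) => pvCellA temp (j : Int) ((temp.length : Int) - 1 - (i : Int))) from rfl]
  rw [pvRow_rev temp W ((temp.length : Int) - 1 - (i : Int))]
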